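-- pv_equiv track=rewrite | github.com/Margarita-Simeonova/for_loop | 06. Vowels Sum.py | vowels_sum
-- ===== SOURCE A (Python) =====
-- def vowels_sum(string):
--     total_sum = 0
--     for el in string:
--         if el == "a":
--             total_sum += 1
--         elif el == "e":
--             total_sum += 2
--         elif el == "i":
--             total_sum += 3
--         elif el == "o":
--             total_sum += 4
--         elif el == "u":
--             total_sum += 5
--
--     return total_sum
-- ===== SOURCE B (Python) =====
-- def vowels_sum(string):
--     return (string.count("a") * 1
--             + string.count("e") * 2
--             + string.count("i") * 3
--             + string.count("o") * 4
--             + string.count("u") * 5)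
-- ===== Notes on version B (the rewrite author's own statement) =====
-- stated objective: idiomatic
-- what changed: Replaces the single character-by-character loop with an if/elif chain by a closed weighted sum of five str.count whole-string scans, one per vowel.
import Mathlib
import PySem

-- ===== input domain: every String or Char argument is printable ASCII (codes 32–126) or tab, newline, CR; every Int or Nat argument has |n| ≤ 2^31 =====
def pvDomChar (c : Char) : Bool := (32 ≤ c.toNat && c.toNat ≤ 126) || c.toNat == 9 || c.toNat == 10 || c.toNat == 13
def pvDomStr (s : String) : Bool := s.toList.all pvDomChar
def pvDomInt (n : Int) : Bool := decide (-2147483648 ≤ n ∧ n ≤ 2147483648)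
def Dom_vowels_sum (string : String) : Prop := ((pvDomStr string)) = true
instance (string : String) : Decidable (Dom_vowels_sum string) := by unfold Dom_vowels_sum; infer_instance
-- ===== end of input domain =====

-- B replaces A's single branching pass by a weighted sum of five whole-string vowel counts (idiomatic; same cost).

-- ===== PORT A =====
def vowels_sum (string : String) : Int :=
  string.toList.foldl (fun total_sum el =>
    if el == 'a' then total_sum + 1
    else if el == 'e' then total_sum + 2
    else if el == 'i' then total_sum + 3
    else if el == 'o' then total_sum + 4
    else if el == 'u' then total_sum + 5
    else total_sum) 0

-- ===== PORT B =====
def vowels_sum_alt (string : String) : Int :=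
  (PySem.Str.count string "a" : Int) * 1
  + (PySem.Str.count string "e" : Int) * 2
  + (PySem.Str.count string "i" : Int) * 3
  + (PySem.Str.count string "o" : Int) * 4
  + (PySem.Str.count string "u" : Int) * 5

-- ===== PRECONDITION & SPEC =====
def Spec_vowels_sum (string : String) (out : Int) : Prop := out = vowels_sum_alt string
instance (string : String) (out : Int) : Decidable (Spec_vowels_sum string out) := by unfold Spec_vowels_sum; infer_instance

-- ===== CLAIM (what is proved, stated in full; the proofs are below) =====
def Claim_equal_vowels_sum : Prop := ∀ (string : String), Dom_vowels_sum string → Spec_vowels_sum string (vowels_sum string)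

-- ===== LEMMAS AND PROOFS =====

-- A substring count with a single-character needle is the list count of that character.
theorem pv_count_go_single (c : Char) :
    ∀ (fuel : Nat) (s : List Char) (acc : Nat), s.length ≤ fuel →
      PySem.Chars.count.go [c] fuel s acc = acc + s.count c := by
  intro fuel
  induction fuel with
  | zero =>
    intro s acc h
    have : s = [] := List.eq_nil_of_length_eq_zero (Nat.le_zero.mp h)
    subst this
    simp [PySem.Chars.count.go]
  | succ n ih =>
    intro s acc h
    cases s with
    | nil => simp [PySem.Chars.count.go]
    | cons hd t =>
      have ht : t.length ≤ n := by simpa using Nat.lt_succ_iff.mp (by simpa using h)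
      have hp : [c].isPrefixOf (hd :: t) = (c == hd) := by simp [List.isPrefixOf]
      simp only [PySem.Chars.count.go, hp]
      by_cases hc : c = hd
      · subst hc
        simp only [beq_self_eq_true, if_pos rfl, List.length_cons, List.length_nil,
          Nat.zero_add, List.drop_one, List.tail_cons]
        rw [ih t (acc + 1) ht]
        simp [List.count_cons]
        omega
      · have : (c == hd) = false := by simp [hc]
        simp only [this, Bool.false_eq_true, if_false]
        rw [ih t acc ht]
        have : (hd == c) = false := by simp; exact fun he => hc he.symm
        simp [List.count_cons, this]

theorem pv_count_single (s : List Char) (c : Char) :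
    PySem.Chars.count s [c] = s.count c := by
  have h := pv_count_go_single c s.length s 0 (le_refl _)
  simp [PySem.Chars.count, h]

theorem pv_foldl_weighted (l : List Char) (a : Int) :
    l.foldl (fun total_sum el =>
      if el == 'a' then total_sum + 1
      else if el == 'e' then total_sum + 2
      else if el == 'i' then total_sum + 3
      else if el == 'o' then total_sum + 4
      else if el == 'u' then total_sum + 5
      else total_sum) a
    = a + (l.count 'a' : Int) * 1 + (l.count 'e' : Int) * 2
        + (l.count 'i' : Int) * 3 + (l.count 'o' : Int) * 4
        + (l.count 'u' : Int) * 5 := by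
  induction l generalizing a with
  | nil => simp
  | cons hd t ih =>
    simp only [List.foldl_cons, ih, List.count_cons]
    by_cases h1 : hd = 'a' <;> by_cases h2 : hd = 'e' <;> by_cases h3 : hd = 'i'
      <;> by_cases h4 : hd = 'o' <;> by_cases h5 : hd = 'u' <;>
      simp_all <;> push_cast <;> ring

-- ===== VERDICT (by name: the statement is the Claim_ definition above) =====
theorem vowels_sum_spec : Claim_equal_vowels_sum := by
  intro s _
  unfold Spec_vowels_sum vowels_sum vowels_sum_alt
  simp only [PySem.Str.count_eq]
  rw [pv_foldl_weighted]
  simp [pv_count_single]
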